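-- pv_equiv track=rewrite | github.com/ragnorak02/kingdomDefense | generate_sprites_v2.py | make_spritesheet
-- ===== SOURCE A (Python) =====
-- def make_grid(w, h, fill=(0,0,0,0)):
--     return [[fill for _ in range(w)] for _ in range(h)]
--
-- def make_spritesheet(frames, fw, fh):
--     """Stitch list of frame grids (each fw x fh) into horizontal strip."""
--     n = len(frames)
--     sheet = make_grid(fw * n, fh)
--     for fi, frame in enumerate(frames):
--         ox = fi * fw
--         for y in range(fh):
--             for x in range(fw):
--                 sheet[y][ox + x] = frame[y][x]
--     return sheet
-- ===== SOURCE B (Python) =====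
-- def make_spritesheet(frames, fw, fh):
--     """Stitch list of frame grids (each fw x fh) into horizontal strip."""
--     return [[frame[y][x] for frame in frames for x in range(fw)]
--             for y in range(fh)]
-- ===== Notes on version B (the rewrite author's own statement) =====
-- stated objective: simpler
-- what changed: B drops A's pre-allocated fill grid and indexed scatter-writes entirely and instead builds each output row directly, y-outermost, as the concatenation of the y-th fw-wide row slices of all frames.
import Mathlib
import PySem

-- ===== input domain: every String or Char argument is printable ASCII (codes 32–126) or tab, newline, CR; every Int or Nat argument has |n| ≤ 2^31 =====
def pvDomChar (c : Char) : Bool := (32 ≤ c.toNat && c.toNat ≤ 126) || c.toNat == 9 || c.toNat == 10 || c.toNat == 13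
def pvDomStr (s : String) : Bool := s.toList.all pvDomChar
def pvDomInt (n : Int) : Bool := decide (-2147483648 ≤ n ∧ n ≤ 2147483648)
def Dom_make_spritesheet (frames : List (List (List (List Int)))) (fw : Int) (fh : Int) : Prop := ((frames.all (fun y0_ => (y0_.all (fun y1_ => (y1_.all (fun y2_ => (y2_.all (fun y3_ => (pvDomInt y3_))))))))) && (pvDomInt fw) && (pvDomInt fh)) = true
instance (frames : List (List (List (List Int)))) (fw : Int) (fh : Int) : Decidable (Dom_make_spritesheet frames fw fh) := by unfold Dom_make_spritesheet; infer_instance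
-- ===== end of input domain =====

-- B builds each output row directly (y outermost) as the concatenation of the y-th fw-wide
-- row slices of all frames, instead of A's pre-allocated fill grid with indexed scatter-writes
-- (objective: simpler; same asymptotic cost).

-- ===== PORT A =====
-- helper: Python's make_grid (fill=(0,0,0,0) ported as the pixel [0,0,0,0])
def make_grid (w : Int) (h : Int) : List (List (List Int)) :=
  (PySem.List.pyRange 0 h 1).map (fun _ =>
    (PySem.List.pyRange 0 w 1).map (fun _ => ([0, 0, 0, 0] : List Int)))

def make_spritesheet (frames : List (List (List (List Int)))) (fw : Int) (fh : Int) :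
    List (List (List Int)) :=
  let n : Int := frames.length
  let sheet := make_grid (fw * n) fh
  (PySem.List.enumerate frames).foldl (fun sheet p =>
    let ox : Int := p.1 * fw
    (PySem.List.pyRange 0 fh 1).foldl (fun sheet y =>
      (PySem.List.pyRange 0 fw 1).foldl (fun sheet x =>
        PySem.List.pySetD sheet y
          (PySem.List.pySetD (PySem.List.pyGetD sheet y ([] : List (List Int))) (ox + x)
            (PySem.List.pyGetD (PySem.List.pyGetD p.2 y ([] : List (List Int))) x
              ([] : List Int)))) sheet) sheet) sheet

-- ===== PORT B =====
def make_spritesheet_alt (frames : List (List (List (List Int)))) (fw : Int) (fh : Int) :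
    List (List (List Int)) :=
  (PySem.List.pyRange 0 fh 1).map (fun y =>
    frames.flatMap (fun frame =>
      (PySem.List.pyRange 0 fw 1).map (fun x =>
        PySem.List.pyGetD (PySem.List.pyGetD frame y ([] : List (List Int))) x
          ([] : List Int))))

-- ===== PRECONDITION & SPEC =====
-- Pre_ excludes exactly the inputs where the Python A raises IndexError: fw > 0 together with
-- a frame that has fewer than fh rows, or one of whose first fh rows is shorter than fw.
def Pre_make_spritesheet (frames : List (List (List (List Int)))) (fw : Int) (fh : Int) : Prop :=
  0 < fw → ∀ frame ∈ frames,
    fh.toNat ≤ frame.length ∧ ∀ row ∈ frame.take fh.toNat, fw ≤ (row.length : Int)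
instance (frames : List (List (List (List Int)))) (fw : Int) (fh : Int) :
    Decidable (Pre_make_spritesheet frames fw fh) := by unfold Pre_make_spritesheet; infer_instance

def pvWitness_make_spritesheet : List (List (List (List Int))) × Int × Int :=
  ([[[[1, 1, 1, 1], [2, 2, 2, 2]], [[3, 3, 3, 3], [4, 4, 4, 4]]]], 2, 2)

def Spec_make_spritesheet (frames : List (List (List (List Int)))) (fw : Int) (fh : Int)
    (out : List (List (List Int))) : Prop := out = make_spritesheet_alt frames fw fh
instance (frames : List (List (List (List Int)))) (fw : Int) (fh : Int)
    (out : List (List (List Int))) : Decidable (Spec_make_spritesheet frames fw fh out) := by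
  unfold Spec_make_spritesheet; infer_instance

-- ===== CLAIM (what is proved, stated in full; the proofs are below) =====
def Claim_equal_make_spritesheet : Prop := ∀ (frames : List (List (List (List Int)))) (fw : Int) (fh : Int), Dom_make_spritesheet frames fw fh → Pre_make_spritesheet frames fw fh → Spec_make_spritesheet frames fw fh (make_spritesheet frames fw fh)

-- ===== LEMMAS AND PROOFS =====

-- frame[y][x] as both ports compute it (total form; in range under Pre_)
def pvVal (f : List (List (List Int))) (y x : Int) : List Int :=
  PySem.List.pyGetD (PySem.List.pyGetD f y ([] : List (List Int))) x ([] : List Int)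

-- the fw-wide slice of row y of one frame
def pvChunk (fw : Int) (f : List (List (List Int))) (y : Int) : List (List Int) :=
  (PySem.List.pyRange 0 fw 1).map (fun x => pvVal f y x)

-- row y of B's result
def pvBRow (frames : List (List (List (List Int)))) (fw : Int) (y : Int) : List (List Int) :=
  frames.flatMap (fun f => pvChunk fw f y)

theorem pvBRow_length (frames : List (List (List (List Int)))) (fw : Int) (y : Int) :
    (pvBRow frames fw y).length = frames.length * fw.toNat := by
  induction frames with
  | nil => simp [pvBRow]
  | cons f fs ih =>
    simp [pvBRow, pvChunk] at ih ⊢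
    simp [Nat.succ_mul]
    omega

theorem pv_flatMap_nil {α β : Type} (l : List β) : l.flatMap (fun _ => ([] : List α)) = [] := by
  induction l with
  | nil => rfl
  | cons x xs ih => simp [List.flatMap_cons, ih]

theorem pv_set_map_range {α : Type} (M : Nat) (h : Nat → α) (y : Nat) (v : α) :
    ((List.range M).map h).set y v = (List.range M).map (fun y' => if y' = y then v else h y') := by
  apply List.ext_getElem
  · simp
  · intro i h1 h2
    simp [List.getElem_set]
    split_ifs with h3 h4 h4 <;> first | rfl | omega

theorem pv_getD_map_range {α : Type} (M : Nat) (h : Nat → α) (y : Nat) (d : α) (hy : y < M) :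
    ((List.range M).map h).getD y d = h y := by
  rw [List.getD_eq_getElem?_getD]
  simp [hy]

theorem pv_set_at {α : Type} (l1 l2 : List α) (a b : α) (n : Nat) (hn : n = l1.length) :
    (l1 ++ a :: l2).set n b = l1 ++ b :: l2 := by
  subst hn
  induction l1 with
  | nil => rfl
  | cons x xs ih => simp [ih]

theorem pv_row_fold (W ox : Nat) (val : Int → List Int) :
    ∀ (row : List (List Int)), ox + W ≤ row.length →
    (List.range W).foldl
        (fun r (k : Nat) => PySem.List.pySetD r ((ox : Int) + (k : Int)) (val (k : Int))) row
      = row.take ox ++ (List.range W).map (fun (k : Nat) => val (k : Int)) ++ row.drop (ox + W) := by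
  induction W with
  | zero => intro row _; simp
  | succ W ih =>
    intro row hlen
    rw [List.range_succ, List.foldl_append, ih row (by omega)]
    simp only [List.foldl_cons, List.foldl_nil]
    have hcast : ((ox : Int) + ((W : Nat) : Int)) = (((ox + W : Nat)) : Int) := by push_cast; ring
    rw [hcast, PySem.List.pySetD_natCast]
    have hd : row.drop (ox + W) = row[ox + W] :: row.drop (ox + W + 1) :=
      List.drop_eq_getElem_cons (by omega)
    have hlen2 : (ox + W)
        = (row.take ox ++ (List.range W).map (fun (k : Nat) => val (k : Int))).length := by
      simp; omega
    rw [hd, pv_set_at _ _ _ _ _ hlen2]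
    simp
    omega

theorem pv_one_y (ox : Int) (val : Int → List Int) :
    ∀ (xs : List Int) (M : Nat) (h : Nat → List (List Int)) (y : Nat), y < M →
    xs.foldl (fun s x => PySem.List.pySetD s (y : Int)
        (PySem.List.pySetD (PySem.List.pyGetD s (y : Int) ([] : List (List Int))) (ox + x)
          (val x)))
      ((List.range M).map h)
    = (List.range M).map (fun y' => if y' = y then
        xs.foldl (fun r x => PySem.List.pySetD r (ox + x) (val x)) (h y) else h y') := by
  intro xs
  induction xs with
  | nil =>
    intro M h y hy
    simp only [List.foldl_nil]
    apply List.map_congr_left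
    intro y' _
    split_ifs with he
    · subst he; rfl
    · rfl
  | cons x xs ih =>
    intro M h y hy
    simp only [List.foldl_cons]
    rw [PySem.List.pyGetD_natCast, pv_getD_map_range M h y _ hy,
        PySem.List.pySetD_natCast, pv_set_map_range M h y _, ih M _ y hy]
    apply List.map_congr_left
    intro y' _
    by_cases he : y' = y
    · subst he; simp
    · simp [he]

theorem pv_frame_fold (xs : List Int) (ox : Int) (val : Int → Int → List Int) :
    ∀ (F M : Nat) (h : Nat → List (List Int)), F ≤ M →
    (List.range F).foldl (fun s yk =>
        xs.foldl (fun s x => PySem.List.pySetD s ((yk : Nat) : Int)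
          (PySem.List.pySetD (PySem.List.pyGetD s ((yk : Nat) : Int) ([] : List (List Int)))
            (ox + x) (val ((yk : Nat) : Int) x))) s)
      ((List.range M).map h)
    = (List.range M).map (fun y => if y < F then
        xs.foldl (fun r x => PySem.List.pySetD r (ox + x) (val ((y : Nat) : Int) x)) (h y)
      else h y) := by
  intro F
  induction F with
  | zero =>
    intro M h _
    simp
  | succ F ih =>
    intro M h hFM
    rw [List.range_succ, List.foldl_append, ih M h (by omega)]
    simp only [List.foldl_cons, List.foldl_nil]
    rw [pv_one_y ox (val ((F : Nat) : Int)) xs M _ F (by omega)]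
    apply List.map_congr_left
    intro y' _
    by_cases he : y' = F
    · subst he; simp
    · by_cases hlt : y' < F
      · simp [he, hlt, Nat.lt_succ_of_lt hlt]
      · have hn : ¬ y' < F + 1 := by omega
        simp [he, hlt, hn]

theorem pv_frames_fold (fw fh : Int) (hfw : 0 ≤ fw) :
    ∀ (fs : List (List (List (List Int)))) (g : Nat → List (List Int)),
    (∀ y < fh.toNat, fs.length * fw.toNat ≤ (g y).length) →
    (PySem.List.enumerate fs 0).foldl
      (fun sheet p =>
        (PySem.List.pyRange 0 fh 1).foldl (fun sheet y =>
          (PySem.List.pyRange 0 fw 1).foldl (fun sheet x =>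
            PySem.List.pySetD sheet y
              (PySem.List.pySetD (PySem.List.pyGetD sheet y ([] : List (List Int)))
                (p.1 * fw + x)
                (PySem.List.pyGetD (PySem.List.pyGetD p.2 y ([] : List (List Int))) x
                  ([] : List Int)))) sheet) sheet)
      ((List.range fh.toNat).map g)
    = (List.range fh.toNat).map
        (fun (y : Nat) => pvBRow fs fw (y : Int) ++ (g y).drop (fs.length * fw.toNat)) := by
  intro fs
  induction fs using List.reverseRecOn with
  | nil =>
    intro g _
    simp [pvBRow]
  | append_singleton fs f ih =>
    intro g hg
    have hg' : ∀ y < fh.toNat, fs.length * fw.toNat ≤ (g y).length := by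
      intro y hy
      have h2 := hg y hy
      simp only [List.length_append, List.length_cons, List.length_nil, Nat.succ_mul] at h2
      omega
    rw [PySem.List.enumerate_append, List.foldl_append, ih g hg']
    simp only [PySem.List.enumerate_cons, PySem.List.enumerate_nil, List.foldl_cons,
      List.foldl_nil, zero_add]
    have hstep := pv_frame_fold (PySem.List.pyRange 0 fw 1) ((fs.length : Int) * fw)
      (fun y x => PySem.List.pyGetD (PySem.List.pyGetD f y ([] : List (List Int))) x
        ([] : List Int))
      fh.toNat fh.toNat
      (fun (y : Nat) => pvBRow fs fw (y : Int) ++ (g y).drop (fs.length * fw.toNat)) le_rfl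
    beta_reduce at hstep
    rw [PySem.List.pyRange_one 0 fh]
    simp only [sub_zero, List.foldl_map, zero_add]
    rw [hstep]
    apply List.map_congr_left
    intro y hy
    rw [List.mem_range] at hy
    rw [if_pos hy]
    have hox : ((fs.length : Int) * fw) = ((fs.length * fw.toNat : Nat) : Int) := by
      conv_lhs => rw [← Int.toNat_of_nonneg hfw]
      push_cast
      ring
    rw [PySem.List.pyRange_one 0 fw, hox]
    simp only [sub_zero, List.foldl_map, zero_add]
    have hrl : fs.length * fw.toNat + fw.toNat
        ≤ (pvBRow fs fw (y : Int) ++ (g y).drop (fs.length * fw.toNat)).length := by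
      have h2 := hg y hy
      simp only [List.length_append, List.length_cons, List.length_nil, Nat.succ_mul] at h2
      simp [pvBRow_length]
      omega
    have hrow := pv_row_fold fw.toNat (fs.length * fw.toNat)
      (fun x => PySem.List.pyGetD (PySem.List.pyGetD f (y : Int) ([] : List (List Int))) x
        ([] : List Int)) _ hrl
    beta_reduce at hrow
    rw [hrow]
    have hbl : (pvBRow fs fw (y : Int)).length = fs.length * fw.toNat :=
      pvBRow_length fs fw (y : Int)
    have hidx : fs.length * fw.toNat + fw.toNat = (pvBRow fs fw (y : Int)).length + fw.toNat := by
      rw [hbl]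
    rw [List.take_left' hbl, hidx, List.drop_append,
        List.drop_eq_nil_of_le (by omega), List.nil_append]
    have hidx2 : (pvBRow fs fw (y : Int)).length + fw.toNat - (pvBRow fs fw (y : Int)).length
        = fw.toNat := by omega
    rw [hidx2, List.drop_drop]
    have hlen3 : (fs ++ [f]).length * fw.toNat = fs.length * fw.toNat + fw.toNat := by
      simp [Nat.succ_mul]
    rw [hlen3]
    congr 1
    simp [pvBRow, pvChunk, pvVal, List.flatMap_append, PySem.List.pyRange_one, Function.comp]

theorem pv_grid_eq (fw : Int) (n : Nat) (fh : Int) :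
    make_grid (fw * (n : Int)) fh
    = (List.range fh.toNat).map (fun _ =>
        (PySem.List.pyRange 0 (fw * (n : Int)) 1).map (fun _ => ([0, 0, 0, 0] : List Int))) := by
  simp only [make_grid, PySem.List.pyRange_one 0 fh, sub_zero, List.map_map]
  rfl

theorem pv_R_length (fw : Int) (n : Nat) (hfw : 0 ≤ fw) :
    ((PySem.List.pyRange 0 (fw * (n : Int)) 1).map
      (fun _ => ([0, 0, 0, 0] : List Int))).length = n * fw.toNat := by
  have hcast : fw * (n : Int) - 0 = ((n * fw.toNat : Nat) : Int) := by
    conv_lhs => rw [← Int.toNat_of_nonneg hfw]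
    push_cast
    ring
  rw [List.length_map, PySem.List.length_pyRange_one, hcast, Int.toNat_natCast]

theorem pv_alt_eq (frames : List (List (List (List Int)))) (fw fh : Int) :
    make_spritesheet_alt frames fw fh
    = (List.range fh.toNat).map (fun (y : Nat) => pvBRow frames fw (y : Int)) := by
  simp only [make_spritesheet_alt, pvBRow, pvChunk, pvVal, PySem.List.pyRange_one 0 fh,
    sub_zero, List.map_map]
  apply List.map_congr_left
  intro k _
  simp

-- ===== VERDICT (by name: the statement is the Claim_ definition above) =====
theorem make_spritesheet_spec : Claim_equal_make_spritesheet := by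
  intro frames fw fh _ _
  unfold Spec_make_spritesheet
  by_cases hfw : 0 ≤ fw
  · have hRlen := pv_R_length fw frames.length hfw
    simp only [make_spritesheet]
    rw [pv_grid_eq fw frames.length fh,
        pv_frames_fold fw fh hfw frames _ (by intro y _; exact hRlen.ge),
        pv_alt_eq frames fw fh]
    apply List.map_congr_left
    intro y _
    rw [List.drop_eq_nil_of_le hRlen.le, List.append_nil]
  · have hfw' : fw ≤ 0 := (not_le.mp hfw).le
    have h2 : fw * ((frames.length : Nat) : Int) ≤ 0 :=
      mul_nonpos_of_nonpos_of_nonneg hfw' (Int.natCast_nonneg _)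
    simp [make_spritesheet, make_spritesheet_alt, make_grid,
      PySem.List.pyRange_one_eq_nil hfw', PySem.List.pyRange_one_eq_nil h2,
      pv_flatMap_nil]
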